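-- pv_equiv track=rewrite | github.com/krinkuto11/acestream-orchestrator | app/proxy/ace_api_client.py | _probe_has_progression
-- ===== SOURCE A (Python) =====
-- def _probe_has_progression(sample_points: list) -> bool:
--     """Return True when probe samples show actual stream movement and data growth."""
--
--     if len(sample_points) < 3:
--         return False
--
--     def _values(key: str) -> list:
--         return [point.get(key) for point in sample_points if isinstance(point.get(key), int)]
--
--     def _increase_count(values: list) -> int:
--         return sum(1 for prev, curr in zip(values, values[1:]) if curr > prev)
--
--     def _change_count(values: list) -> int:
--         return sum(1 for prev, curr in zip(values, values[1:]) if curr != prev)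
--
--     positions = _values("pos")
--     last_timestamps = _values("last_ts")
--     progress_values = _values("progress")
--     downloaded_values = _values("downloaded")
--
--     timeline_changes = max(
--         _change_count(positions),
--         _change_count(last_timestamps),
--         _increase_count(progress_values),
--     )
--     download_increases = _increase_count(downloaded_values)
--     has_timeline_signal = bool(len(positions) >= 2 or len(last_timestamps) >= 2)
--
--     # Accept either sustained movement, or early movement + strong payload growth.
--     # The second branch avoids transient false negatives when the final sample briefly plateaus.
--     sustained_progression = timeline_changes >= 2 and download_increases >= 1
--     warmup_then_plateau = timeline_changes >= 1 and download_increases >= 2 and has_timeline_signal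
--
--     return bool(sustained_progression or warmup_then_plateau)
-- ===== SOURCE B (Python) =====
-- def _probe_has_progression(sample_points: list) -> bool:
--     """Single fused pass: per-key previous value + seen/change/increase counters."""
--     if len(sample_points) < 3:
--         return False
--
--     keys = ("pos", "last_ts", "progress", "downloaded")
--     prev = {k: None for k in keys}
--     seen = {k: 0 for k in keys}
--     chg = {k: 0 for k in keys}
--     inc = {k: 0 for k in keys}
--
--     for point in sample_points:
--         for k in keys:
--             v = point.get(k)
--             if isinstance(v, int):
--                 seen[k] += 1
--                 p = prev[k]
--                 if p is not None:
--                     if v != p: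
--                         chg[k] += 1
--                     if v > p:
--                         inc[k] += 1
--                 prev[k] = v
--
--     timeline_changes = max(chg["pos"], chg["last_ts"], inc["progress"])
--     download_increases = inc["downloaded"]
--     has_timeline_signal = seen["pos"] >= 2 or seen["last_ts"] >= 2
--
--     return (timeline_changes >= 2 and download_increases >= 1) or (
--         timeline_changes >= 1 and download_increases >= 2 and has_timeline_signal
--     )
-- ===== Notes on version B (the rewrite author's own statement) =====
-- stated objective: alternative
-- what changed: Replaced four filtered-list extractions plus separate pairwise zip counts with one fused pass over sample_points that keeps, per key, the previous int value and seen/change/increase counters.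
import Mathlib
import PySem

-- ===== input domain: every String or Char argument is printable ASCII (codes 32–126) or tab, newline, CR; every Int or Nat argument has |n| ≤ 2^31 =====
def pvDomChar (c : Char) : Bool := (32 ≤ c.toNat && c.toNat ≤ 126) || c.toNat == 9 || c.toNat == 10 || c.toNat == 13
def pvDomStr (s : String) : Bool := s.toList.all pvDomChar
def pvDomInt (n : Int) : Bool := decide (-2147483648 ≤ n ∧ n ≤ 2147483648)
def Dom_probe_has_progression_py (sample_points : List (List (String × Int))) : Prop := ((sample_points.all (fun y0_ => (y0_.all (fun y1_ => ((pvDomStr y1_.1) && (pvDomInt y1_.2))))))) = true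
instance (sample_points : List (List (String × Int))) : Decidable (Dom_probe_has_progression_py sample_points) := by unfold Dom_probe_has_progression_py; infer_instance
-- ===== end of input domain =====

-- B fuses A's four filtered-list extractions and pairwise zip counts into one pass
-- keeping per-key previous value and seen/change/increase counters (alternative, same O(n)).

-- ===== PORT A =====
-- point.get(key): first match in the association list (dict lookup)
def pvGet (point : List (String × Int)) (key : String) : Option Int :=
  (PySem.Dict.mk point).get? key

-- _values(key): values present (all dict values are ints, so isinstance keeps exactly the present ones)
def pvValues (sample_points : List (List (String × Int))) (key : String) : List Int :=
  sample_points.filterMap (fun point => pvGet point key)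

-- _increase_count
def pvIncreaseCount (values : List Int) : Nat :=
  (values.zip (values.drop 1)).countP (fun pc => decide (pc.1 < pc.2))

-- _change_count
def pvChangeCount (values : List Int) : Nat :=
  (values.zip (values.drop 1)).countP (fun pc => pc.2 != pc.1)

def probe_has_progression_py (sample_points : List (List (String × Int))) : Bool :=
  if sample_points.length < 3 then false
  else
    let positions := pvValues sample_points "pos"
    let last_timestamps := pvValues sample_points "last_ts"
    let progress_values := pvValues sample_points "progress"
    let downloaded_values := pvValues sample_points "downloaded"
    let timeline_changes :=
      Nat.max (Nat.max (pvChangeCount positions) (pvChangeCount last_timestamps))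
        (pvIncreaseCount progress_values)
    let download_increases := pvIncreaseCount downloaded_values
    let has_timeline_signal := decide (2 ≤ positions.length) || decide (2 ≤ last_timestamps.length)
    let sustained_progression := decide (2 ≤ timeline_changes) && decide (1 ≤ download_increases)
    let warmup_then_plateau :=
      decide (1 ≤ timeline_changes) && decide (2 ≤ download_increases) && has_timeline_signal
    sustained_progression || warmup_then_plateau

-- ===== PORT B =====
-- per-key state: (previous int value or none, seen count, change count, increase count)
def pvStep (st : Option Int × Nat × Nat × Nat) (ov : Option Int) : Option Int × Nat × Nat × Nat :=
  match ov with
  | none => st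
  | some v =>
    match st with
    | (p, s, c, i) =>
      match p with
      | none => (some v, s + 1, c, i)
      | some pv => (some v, s + 1, c + (if v != pv then 1 else 0), i + (if pv < v then 1 else 0))

def probe_has_progression_py_alt (sample_points : List (List (String × Int))) : Bool :=
  if sample_points.length < 3 then false
  else
    let st := sample_points.foldl
      (fun st point =>
        (pvStep st.1 (pvGet point "pos"),
         pvStep st.2.1 (pvGet point "last_ts"),
         pvStep st.2.2.1 (pvGet point "progress"),
         pvStep st.2.2.2 (pvGet point "downloaded")))
      ((none, 0, 0, 0), (none, 0, 0, 0), (none, 0, 0, 0), (none, 0, 0, 0))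
    let timeline_changes := Nat.max (Nat.max st.1.2.2.1 st.2.1.2.2.1) st.2.2.1.2.2.2
    let download_increases := st.2.2.2.2.2.2
    let has_timeline_signal := decide (2 ≤ st.1.2.1) || decide (2 ≤ st.2.1.2.1)
    (decide (2 ≤ timeline_changes) && decide (1 ≤ download_increases)) ||
      (decide (1 ≤ timeline_changes) && decide (2 ≤ download_increases) && has_timeline_signal)

-- ===== PRECONDITION & SPEC =====
def Spec_probe_has_progression_py (sample_points : List (List (String × Int))) (out : Bool) : Prop := out = probe_has_progression_py_alt sample_points
instance (sample_points : List (List (String × Int))) (out : Bool) : Decidable (Spec_probe_has_progression_py sample_points out) := by unfold Spec_probe_has_progression_py; infer_instance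

-- ===== CLAIM (what is proved, stated in full; the proofs are below) =====
def Claim_equal_probe_has_progression_py : Prop := ∀ (sample_points : List (List (String × Int))), Dom_probe_has_progression_py sample_points → Spec_probe_has_progression_py sample_points (probe_has_progression_py sample_points)

-- ===== LEMMAS AND PROOFS =====

-- characterisations of the per-key fold result, starting from an optional previous value
def pvLastO (p : Option Int) : List Int → Option Int
  | [] => p
  | v :: vs => pvLastO (some v) vs

def pvChg (p : Option Int) : List Int → Nat
  | [] => 0
  | v :: vs =>
    match p with
    | none => pvChg (some v) vs
    | some pv => (if v != pv then 1 else 0) + pvChg (some v) vs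

def pvInc (p : Option Int) : List Int → Nat
  | [] => 0
  | v :: vs =>
    match p with
    | none => pvInc (some v) vs
    | some pv => (if pv < v then 1 else 0) + pvInc (some v) vs

theorem pvStep_fold (key : String) :
    ∀ (ps : List (List (String × Int))) (p : Option Int) (s c i : Nat),
      ps.foldl (fun st point => pvStep st (pvGet point key)) (p, s, c, i) =
        (pvLastO p (pvValues ps key),
         s + (pvValues ps key).length,
         c + pvChg p (pvValues ps key),
         i + pvInc p (pvValues ps key)) := by
  intro ps
  induction ps with
  | nil => intro p s c i; simp [pvValues, pvLastO, pvChg, pvInc]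
  | cons q qs ih =>
    intro p s c i
    simp only [List.foldl_cons]
    cases hq : pvGet q key with
    | none =>
      have hstep : pvStep (p, s, c, i) none = (p, s, c, i) := by simp [pvStep]
      rw [hstep, ih]
      simp [pvValues, List.filterMap_cons, hq]
    | some v =>
      cases p with
      | none =>
        have hstep : pvStep ((none : Option Int), s, c, i) (some v) = (some v, s + 1, c, i) := by
          simp [pvStep]
        rw [hstep, ih]
        simp [pvValues, List.filterMap_cons, hq, pvLastO, pvChg, pvInc, Nat.add_comm,
          Nat.add_assoc, Nat.add_left_comm]
      | some pv =>
        have hstep : pvStep (some pv, s, c, i) (some v) =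
            (some v, s + 1, c + (if v != pv then 1 else 0), i + (if pv < v then 1 else 0)) := by
          simp [pvStep]
        rw [hstep, ih]
        simp [pvValues, List.filterMap_cons, hq, pvLastO, pvChg, pvInc, Nat.add_comm,
          Nat.add_assoc, Nat.add_left_comm]

theorem pvChg_eq_countP : ∀ (vs : List Int) (p : Int),
    pvChg (some p) vs = ((p :: vs).zip vs).countP (fun pc => pc.2 != pc.1) := by
  intro vs
  induction vs with
  | nil => intro p; simp [pvChg]
  | cons v vs ih =>
    intro p
    simp [pvChg, List.zip, List.countP_cons, ih v]
    omega

theorem pvInc_eq_countP : ∀ (vs : List Int) (p : Int),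
    pvInc (some p) vs = ((p :: vs).zip vs).countP (fun pc => decide (pc.1 < pc.2)) := by
  intro vs
  induction vs with
  | nil => intro p; simp [pvInc]
  | cons v vs ih =>
    intro p
    simp [pvInc, List.zip, List.countP_cons, ih v]
    omega

theorem pvChg_none (vs : List Int) : pvChg none vs = pvChangeCount vs := by
  cases vs with
  | nil => simp [pvChg, pvChangeCount]
  | cons v vs => simp [pvChg, pvChangeCount, pvChg_eq_countP]

theorem pvInc_none (vs : List Int) : pvInc none vs = pvIncreaseCount vs := by
  cases vs with
  | nil => simp [pvInc, pvIncreaseCount]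
  | cons v vs => simp [pvInc, pvIncreaseCount, pvInc_eq_countP]

-- the fused 4-component loop is four independent per-key loops
theorem pvFold_split (ps : List (List (String × Int))) :
    ps.foldl
      (fun st point =>
        (pvStep st.1 (pvGet point "pos"),
         pvStep st.2.1 (pvGet point "last_ts"),
         pvStep st.2.2.1 (pvGet point "progress"),
         pvStep st.2.2.2 (pvGet point "downloaded")))
      ((none, 0, 0, 0), (none, 0, 0, 0), (none, 0, 0, 0), (none, 0, 0, 0)) =
      (ps.foldl (fun st point => pvStep st (pvGet point "pos")) (none, 0, 0, 0),
       ps.foldl (fun st point => pvStep st (pvGet point "last_ts")) (none, 0, 0, 0),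
       ps.foldl (fun st point => pvStep st (pvGet point "progress")) (none, 0, 0, 0),
       ps.foldl (fun st point => pvStep st (pvGet point "downloaded")) (none, 0, 0, 0)) := by
  rw [PySem.List.foldl_prod_mk (f := fun st point => pvStep st (pvGet point "pos"))
    (g := fun st point =>
        (pvStep st.1 (pvGet point "last_ts"),
         pvStep st.2.1 (pvGet point "progress"),
         pvStep st.2.2 (pvGet point "downloaded")))]
  rw [PySem.List.foldl_prod_mk (f := fun st point => pvStep st (pvGet point "last_ts"))
    (g := fun st point =>
        (pvStep st.1 (pvGet point "progress"),
         pvStep st.2 (pvGet point "downloaded")))]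
  rw [PySem.List.foldl_prod_mk (f := fun st point => pvStep st (pvGet point "progress"))
    (g := fun st point => pvStep st (pvGet point "downloaded"))]

-- ===== VERDICT (by name: the statement is the Claim_ definition above) =====
theorem probe_has_progression_py_spec : Claim_equal_probe_has_progression_py := by
  intro sp _
  unfold Spec_probe_has_progression_py probe_has_progression_py probe_has_progression_py_alt
  by_cases h : sp.length < 3
  · simp [h]
  · simp only [h, if_neg h]
    rw [pvFold_split, pvStep_fold, pvStep_fold, pvStep_fold, pvStep_fold]
    simp [pvChg_none, pvInc_none]
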